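-- pv_equiv track=rewrite | github.com/exphp-share/seasonize | scripts/patch-ecls.py | parse_funcs
-- ===== SOURCE A (Python) =====
-- def parse_funcs(text):
--     """ An EXTREMELY simple parser that tags groups of lines with the name of the
--     function they belong to (or, for lines not in a function, the name of the most
--     recently defined function). Many assumptions are made about the style of code
--     generated by thecl. """
--
--     lines = text.splitlines()
--     func = None
--     group = []
--     output = []
--     for line in lines:
--         if line.strip() and line.split()[0] in ['void', 'int', 'float']:
--             output.append((func, group))
--             func = line.split(None, 1)[1].split('(')[0]
--             group = []
--             assert func
--
--         group.append(line)
--     output.append((func, group))  # final group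
--
--     return output
-- ===== SOURCE B (Python) =====
-- def parse_funcs(text):
--     """Same tagging, built back-to-front: scan the lines in reverse, closing a
--     group each time its header line is reached, then reverse the result."""
--     lines = text.splitlines()
--     out = []
--     group = []
--     for line in reversed(lines):
--         if line.strip() and line.split()[0] in ['void', 'int', 'float']:
--             func = line.split(None, 1)[1].split('(')[0]
--             assert func
--             out.append((func, [line] + group))
--             group = []
--         else:
--             group = [line] + group
--     out.append((None, group))
--     out.reverse()
--     return out
-- ===== Notes on version B (the rewrite author's own statement) =====
-- stated objective: alternative
-- what changed: B builds the grouping back-to-front: a single reverse scan closes each group exactly when its header line is reached, replacing A's forward scan with a running (func, group) accumulator that must emit the previous group at each header.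
import Mathlib
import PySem

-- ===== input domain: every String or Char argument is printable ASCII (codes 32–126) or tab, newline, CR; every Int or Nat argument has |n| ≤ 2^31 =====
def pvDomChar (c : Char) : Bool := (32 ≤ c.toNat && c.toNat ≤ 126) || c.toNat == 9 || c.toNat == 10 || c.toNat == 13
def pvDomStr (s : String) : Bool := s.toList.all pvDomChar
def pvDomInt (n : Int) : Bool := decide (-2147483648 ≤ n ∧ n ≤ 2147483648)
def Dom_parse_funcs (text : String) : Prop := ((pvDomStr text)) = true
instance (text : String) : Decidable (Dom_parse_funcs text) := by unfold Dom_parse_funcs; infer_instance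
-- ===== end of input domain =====

-- B builds the same tagged groups back-to-front (one reverse scan closing a group at its
-- header line) instead of A's forward scan with a running accumulator; alternative, same cost.


-- shared by both ports (both Pythons compute exactly these subexpressions):
-- `line.strip() and line.split()[0] in ['void', 'int', 'float']`
def pvIsHeader (line : String) : Bool :=
  decide (PySem.Str.strip line ≠ "") &&
    (["void", "int", "float"].contains ((PySem.List.pyGet? (PySem.Str.split₀ line) 0).getD ""))

-- `line.split(None, 1)[1].split('(')[0]`  (the getD defaults are unreachable inside Pre_:
-- Python raises IndexError there, which Pre_ excludes)
def pvName (line : String) : String :=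
  (((PySem.Str.split? ((PySem.List.pyGet? (PySem.Str.split₀Max line 1) 1).getD "") "(").getD []).getD 0 "")

-- ===== PORT A =====
-- the for-loop of A, state (func, group, output), lines processed front to back
def pfA_go (func : Option String) (group : List String)
    (output : List (Option String × List String)) :
    List String → List (Option String × List String)
  | [] => output ++ [(func, group)]
  | line :: rest =>
    if pvIsHeader line then
      -- append (func, group); func := parsed name; group := [] then group.append(line)
      pfA_go (some (pvName line)) [line] (output ++ [(func, group)]) rest
    else
      pfA_go func (group ++ [line]) output rest

def parse_funcs (text : String) : List (Option String × List String) :=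
  pfA_go none [] [] (PySem.Str.splitlines text)

-- ===== PORT B =====
-- one step of B's loop over reversed(lines), state (out, group)
def pfB_go (st : List (Option String × List String) × List String) (line : String) :
    List (Option String × List String) × List String :=
  if pvIsHeader line then (st.1 ++ [(some (pvName line), line :: st.2)], [])
  else (st.1, line :: st.2)

def parse_funcs_alt (text : String) : List (Option String × List String) :=
  let lines := PySem.Str.splitlines text
  let st := lines.reverse.foldl pfB_go ([], [])
  (st.1 ++ [(none, st.2)]).reverse

-- ===== PRECONDITION & SPEC =====
-- Pre_ excludes exactly the inputs on which the Pythons raise: a header line with no second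
-- whitespace-token (IndexError in A and B) or whose parsed name is empty (AssertionError in both).
def Pre_parse_funcs (text : String) : Prop :=
  ∀ line ∈ PySem.Str.splitlines text, pvIsHeader line = true →
    (PySem.Str.split₀Max line 1).length = 2 ∧ pvName line ≠ ""
instance (text : String) : Decidable (Pre_parse_funcs text) := by
  unfold Pre_parse_funcs; infer_instance

def pvWitness_parse_funcs : String := "x\nint f()\n  y;"

def Spec_parse_funcs (text : String) (out : List (Option String × List String)) : Prop := out = parse_funcs_alt text
instance (text : String) (out : List (Option String × List String)) : Decidable (Spec_parse_funcs text out) := by unfold Spec_parse_funcs; infer_instance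

-- ===== CLAIM (what is proved, stated in full; the proofs are below) =====
def Claim_equal_parse_funcs : Prop := ∀ (text : String), Dom_parse_funcs text → Pre_parse_funcs text → Spec_parse_funcs text (parse_funcs text)

-- ===== LEMMAS AND PROOFS =====

-- B's reverse-scan loop behaves as a foldr on the original line list
theorem pfB_core_cons (line : String) (ls : List String) :
    (line :: ls).reverse.foldl pfB_go ([], []) =
      pfB_go (ls.reverse.foldl pfB_go ([], [])) line := by
  simp [List.foldl_append]

-- main bridge: A's forward loop equals B's back-to-front result
theorem pfA_go_eq (lines : List String) :
    ∀ (func : Option String) (group : List String)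
      (output : List (Option String × List String)),
      pfA_go func group output lines =
        output ++ (func, group ++ (lines.reverse.foldl pfB_go ([], [])).2) ::
          (lines.reverse.foldl pfB_go ([], [])).1.reverse := by
  induction lines with
  | nil => intro func group output; simp [pfA_go]
  | cons line ls ih =>
    intro func group output
    rw [pfB_core_cons]
    by_cases h : pvIsHeader line = true
    · simp [pfA_go, pfB_go, h, ih]
    · simp only [Bool.not_eq_true] at h
      simp [pfA_go, pfB_go, h, ih]

-- ===== VERDICT (by name: the statement is the Claim_ definition above) =====
theorem parse_funcs_spec : Claim_equal_parse_funcs := by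
  intro text _ _
  unfold Spec_parse_funcs parse_funcs parse_funcs_alt
  rw [pfA_go_eq]
  simp
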